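-- pv_equiv track=rewrite | github.com/pydata/xarray | xarray/coding/times.py | build_pattern
-- ===== SOURCE A (Python) =====
-- def named(name: str, pattern: str) -> str:
--     return "(?P<" + name + ">" + pattern + ")"
--
-- def optional(x: str) -> str:
--     return "(?:" + x + ")?"
--
-- def trailing_optional(xs: list[str]) -> str:
--     if not xs:
--         return ""
--     return xs[0] + optional(trailing_optional(xs[1:]))
--
-- def build_pattern(
--     date_sep: str = r"\-",
--     datetime_sep: str = r"T",
--     time_sep: str = r"\:",
--     micro_sep: str = r".",
-- ) -> str:
--     pieces = [
--         (None, "year", r"[+-]?\d{4,5}"),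
--         (date_sep, "month", r"\d{2}"),
--         (date_sep, "day", r"\d{2}"),
--         (datetime_sep, "hour", r"\d{2}"),
--         (time_sep, "minute", r"\d{2}"),
--         (time_sep, "second", r"\d{2}"),
--         (micro_sep, "microsecond", r"\d{1,6}"),
--     ]
--     pattern_list = []
--     for sep, name, sub_pattern in pieces:
--         pattern_list.append((sep if sep else "") + named(name, sub_pattern))
--         # TODO: allow timezone offsets?
--     return "^" + trailing_optional(pattern_list) + "$"
-- ===== SOURCE B (Python) =====
-- def named(name: str, pattern: str) -> str:
--     return "(?P<" + name + ">" + pattern + ")"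
--
-- def optional(x: str) -> str:
--     return "(?:" + x + ")?"
--
-- def build_pattern(
--     date_sep: str = r"\-",
--     datetime_sep: str = r"T",
--     time_sep: str = r"\:",
--     micro_sep: str = r".",
-- ) -> str:
--     pieces = [
--         (None, "year", r"[+-]?\d{4,5}"),
--         (date_sep, "month", r"\d{2}"),
--         (date_sep, "day", r"\d{2}"),
--         (datetime_sep, "hour", r"\d{2}"),
--         (time_sep, "minute", r"\d{2}"),
--         (time_sep, "second", r"\d{2}"),
--         (micro_sep, "microsecond", r"\d{1,6}"),
--     ]
--     pattern_list = []
--     for sep, name, sub_pattern in pieces: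
--         pattern_list.append((sep if sep else "") + named(name, sub_pattern))
--     acc = ""
--     for x in reversed(pattern_list):
--         acc = x + optional(acc)
--     return "^" + acc + "$"
-- ===== Notes on version B (the rewrite author's own statement) =====
-- stated objective: alternative
-- what changed: Replaces the recursive trailing_optional (recursion peeling the list front with slicing) by an iterative right-to-left accumulation: starting from an empty accumulator, each piece is folded in as x + optional(acc) over the reversed list, eliminating the recursion and the per-call list copies.
import Mathlib
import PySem

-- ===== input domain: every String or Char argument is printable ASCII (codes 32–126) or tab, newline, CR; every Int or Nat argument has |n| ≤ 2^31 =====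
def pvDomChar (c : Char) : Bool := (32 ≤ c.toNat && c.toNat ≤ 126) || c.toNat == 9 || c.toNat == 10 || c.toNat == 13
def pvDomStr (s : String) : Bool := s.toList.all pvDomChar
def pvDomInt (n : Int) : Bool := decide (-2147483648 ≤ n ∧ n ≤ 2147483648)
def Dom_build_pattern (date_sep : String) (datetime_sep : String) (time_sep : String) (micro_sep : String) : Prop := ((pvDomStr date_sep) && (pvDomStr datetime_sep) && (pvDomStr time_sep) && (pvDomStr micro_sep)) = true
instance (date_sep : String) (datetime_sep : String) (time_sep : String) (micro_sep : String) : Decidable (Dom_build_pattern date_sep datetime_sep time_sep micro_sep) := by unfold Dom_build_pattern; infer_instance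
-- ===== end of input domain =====

-- B replaces the recursive trailing_optional by an iterative reversed-order accumulation; objective: alternative decomposition.

-- ===== PORT A =====
def pvNamed (name : String) (pattern : String) : String := "(?P<" ++ name ++ ">" ++ pattern ++ ")"

def pvOptional (x : String) : String := "(?:" ++ x ++ ")?"

def pvTrailingOptional : List String → String
  | [] => ""
  | x :: xs => x ++ pvOptional (pvTrailingOptional xs)

-- pieces loop: sep-if-sep-else-"" + named(name, sub); None ported as "" separator (Python's `sep if sep else ""`)
def pvPieces (date_sep datetime_sep time_sep micro_sep : String) : List String :=
  [ "" ++ pvNamed "year" "[+-]?\\d{4,5}",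
    date_sep ++ pvNamed "month" "\\d{2}",
    date_sep ++ pvNamed "day" "\\d{2}",
    datetime_sep ++ pvNamed "hour" "\\d{2}",
    time_sep ++ pvNamed "minute" "\\d{2}",
    time_sep ++ pvNamed "second" "\\d{2}",
    micro_sep ++ pvNamed "microsecond" "\\d{1,6}" ]

def build_pattern (date_sep : String) (datetime_sep : String) (time_sep : String) (micro_sep : String) : String :=
  "^" ++ pvTrailingOptional (pvPieces date_sep datetime_sep time_sep micro_sep) ++ "$"

-- ===== PORT B =====
def build_pattern_alt (date_sep : String) (datetime_sep : String) (time_sep : String) (micro_sep : String) : String :=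
  let acc := (pvPieces date_sep datetime_sep time_sep micro_sep).reverse.foldl
    (fun acc x => x ++ pvOptional acc) ""
  "^" ++ acc ++ "$"

-- ===== PRECONDITION & SPEC =====
def Spec_build_pattern (date_sep : String) (datetime_sep : String) (time_sep : String) (micro_sep : String) (out : String) : Prop := out = build_pattern_alt date_sep datetime_sep time_sep micro_sep
instance (date_sep : String) (datetime_sep : String) (time_sep : String) (micro_sep : String) (out : String) : Decidable (Spec_build_pattern date_sep datetime_sep time_sep micro_sep out) := by unfold Spec_build_pattern; infer_instance

-- ===== CLAIM (what is proved, stated in full; the proofs are below) =====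
def Claim_equal_build_pattern : Prop := ∀ (date_sep : String) (datetime_sep : String) (time_sep : String) (micro_sep : String), Dom_build_pattern date_sep datetime_sep time_sep micro_sep → Spec_build_pattern date_sep datetime_sep time_sep micro_sep (build_pattern date_sep datetime_sep time_sep micro_sep)

-- ===== LEMMAS AND PROOFS =====
-- Folding x + optional(acc) over the reversed list builds exactly the right-nested trailing_optional string.
theorem pv_fold_eq_trailing (xs : List String) :
    xs.reverse.foldl (fun acc x => x ++ pvOptional acc) "" = pvTrailingOptional xs := by
  induction xs with
  | nil => simp [pvTrailingOptional]
  | cons x xs ih =>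
    simp only [List.reverse_cons, List.foldl_append, List.foldl_cons, List.foldl_nil, ih,
      pvTrailingOptional]

-- ===== VERDICT (by name: the statement is the Claim_ definition above) =====
theorem build_pattern_spec : Claim_equal_build_pattern := by
  intro d t s m _
  unfold Spec_build_pattern build_pattern build_pattern_alt
  rw [pv_fold_eq_trailing]
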